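-- pv_equiv track=rewrite | github.com/TeeHaoBin/IPPR-Assignment | src/app.py | identify_state
-- ===== SOURCE A (Python) =====
-- def identify_state(plate_text):
--     """Identify Malaysian state from license plate text"""
--     if not plate_text:
--         return "Unknown"
--
--     clean_plate = plate_text.replace(' ', '').upper()
--
--     state_map = {
--         # Single letter states
--         "A": "Perak",
--         "B": "Selangor",
--         "C": "Pahang",
--         "D": "Kelantan",
--         "F": "W.P. Putrajaya",
--         "J": "Johor",
--         "K": "Kedah",
--         "L": "W.P. Labuan",
--         "M": "Melaka",
--         "N": "Negeri Sembilan",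
--         "P": "Pulau Pinang",
--         "Q": "Sarawak",
--         "R": "Perlis",
--         "S": "Sabah",
--         "T": "Terengganu",
--         "V": "W.P. Kuala Lumpur",
--         "W": "W.P. Kuala Lumpur",
--         "Z": "Military",
--
--         # Multi-letter prefixes
--         "KV": "Langkawi",
--         "EV": "Special Series",
--         "FFF": "Special Series",
--         "VIP": "Special Series",
--         "GOLD": "Special Series",
--         "LIMO": "Special Series",
--         "MADANI": "Special Series",
--         "PETRA": "Special Series",
--         "U": "Special Series",
--         "X": "Special Series",
--         "Y": "Special Series",
--         "H": "Taxi"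
--     }
--
--     for prefix in sorted(state_map.keys(), key=len, reverse=True):
--         if clean_plate.startswith(prefix):
--             return state_map[prefix]
--
--     first_char = clean_plate[0] if clean_plate else ""
--     return state_map.get(first_char, "Unknown")
-- ===== SOURCE B (Python) =====
-- _MULTI = (
--     ("MADANI", "Special Series"),
--     ("PETRA", "Special Series"),
--     ("GOLD", "Special Series"),
--     ("LIMO", "Special Series"),
--     ("FFF", "Special Series"),
--     ("VIP", "Special Series"),
--     ("KV", "Langkawi"),
--     ("EV", "Special Series"),
-- )
--
--
-- def _single(c):
--     """One-letter prefix dispatch."""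
--     match c:
--         case "A": return "Perak"
--         case "B": return "Selangor"
--         case "C": return "Pahang"
--         case "D": return "Kelantan"
--         case "F": return "W.P. Putrajaya"
--         case "J": return "Johor"
--         case "K": return "Kedah"
--         case "L": return "W.P. Labuan"
--         case "M": return "Melaka"
--         case "N": return "Negeri Sembilan"
--         case "P": return "Pulau Pinang"
--         case "Q": return "Sarawak"
--         case "R": return "Perlis"
--         case "S": return "Sabah"
--         case "T": return "Terengganu"
--         case "V": return "W.P. Kuala Lumpur"
--         case "W": return "W.P. Kuala Lumpur"
--         case "Z": return "Military"
--         case "U": return "Special Series"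
--         case "X": return "Special Series"
--         case "Y": return "Special Series"
--         case "H": return "Taxi"
--         case _: return "Unknown"
--
--
-- def identify_state(plate_text):
--     """Identify Malaysian state from license plate text"""
--     if not plate_text:
--         return "Unknown"
--
--     clean_plate = plate_text.replace(' ', '').upper()
--
--     # Two stages: the few multi-letter special prefixes (longest first),
--     # then a dispatch on the first character.
--     for prefix, state in _MULTI:
--         if clean_plate.startswith(prefix):
--             return state
--
--     return _single(clean_plate[0]) if clean_plate else "Unknown"
-- ===== Notes on version B (the rewrite author's own statement) =====
-- stated objective: idiomatic
-- what changed: Instead of sorting all 30 dict keys by length and scanning them with startswith, B checks a short literal list of the 8 multi-letter prefixes longest-first and otherwise dispatches on the plate's first character, dropping the sort, the full-dict scan and A's provably redundant first_char fallback.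
import Mathlib
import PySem

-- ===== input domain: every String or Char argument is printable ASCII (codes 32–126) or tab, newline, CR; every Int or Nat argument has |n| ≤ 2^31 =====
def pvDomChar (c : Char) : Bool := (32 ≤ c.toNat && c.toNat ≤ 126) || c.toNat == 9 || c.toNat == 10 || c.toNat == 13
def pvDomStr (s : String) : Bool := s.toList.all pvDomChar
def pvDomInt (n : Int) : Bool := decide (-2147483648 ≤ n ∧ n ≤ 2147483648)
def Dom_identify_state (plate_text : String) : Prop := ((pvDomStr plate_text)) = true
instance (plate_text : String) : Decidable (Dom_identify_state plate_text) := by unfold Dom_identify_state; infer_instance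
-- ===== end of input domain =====

-- B replaces A's sort-the-dict-keys-and-startswith scan by two stages: a short literal
-- list of the multi-letter prefixes checked longest-first, then a direct dispatch on the
-- first character (idiomatic; same values everywhere; A's first_char fallback is redundant).

-- ===== PORT A =====
-- the dict literal state_map (string keys ported on the List Char side, as PySem.Chars works there)
def stateMapA : PySem.Dict (List Char) String := PySem.Dict.ofList [
  (['A'], "Perak"), (['B'], "Selangor"), (['C'], "Pahang"), (['D'], "Kelantan"),
  (['F'], "W.P. Putrajaya"), (['J'], "Johor"), (['K'], "Kedah"), (['L'], "W.P. Labuan"),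
  (['M'], "Melaka"), (['N'], "Negeri Sembilan"), (['P'], "Pulau Pinang"), (['Q'], "Sarawak"),
  (['R'], "Perlis"), (['S'], "Sabah"), (['T'], "Terengganu"), (['V'], "W.P. Kuala Lumpur"),
  (['W'], "W.P. Kuala Lumpur"), (['Z'], "Military"),
  (['K','V'], "Langkawi"), (['E','V'], "Special Series"), (['F','F','F'], "Special Series"),
  (['V','I','P'], "Special Series"), (['G','O','L','D'], "Special Series"),
  (['L','I','M','O'], "Special Series"), (['M','A','D','A','N','I'], "Special Series"),
  (['P','E','T','R','A'], "Special Series"), (['U'], "Special Series"), (['X'], "Special Series"),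
  (['Y'], "Special Series"), (['H'], "Taxi")]

-- the 'for prefix in sorted(...)' loop; on fall-through, the first_char fallback
-- (state_map[prefix] inside the loop is exact: prefix is drawn from state_map's keys, so get? is some)
def aScan (clean : List Char) : List (List Char) → String
  | [] =>
      let first_char : List Char := if clean ≠ [] then [clean.head!] else []
      (stateMapA.get? first_char).getD "Unknown"
  | p :: rest =>
      if PySem.Chars.startswith clean p then (stateMapA.get? p).getD "" else aScan clean rest

def identify_state (plate_text : String) : String :=
  if plate_text = "" then "Unknown"
  else
    let clean := PySem.Chars.upper (PySem.Chars.replace plate_text.toList [' '] [])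
    aScan clean (PySem.List.sorted stateMapA.keys (fun k => PySem.Chars.len k) true)

-- ===== PORT B =====
-- the tuple _MULTI (string keys on the List Char side)
def multiB : List (List Char × String) := [
  (['M','A','D','A','N','I'], "Special Series"),
  (['P','E','T','R','A'], "Special Series"),
  (['G','O','L','D'], "Special Series"),
  (['L','I','M','O'], "Special Series"),
  (['F','F','F'], "Special Series"),
  (['V','I','P'], "Special Series"),
  (['K','V'], "Langkawi"),
  (['E','V'], "Special Series")]

-- _single: Python's 'match' on string literals is an equality-test chain, ported as such
def singleB (c : Char) : String :=
  if c = 'A' then "Perak" else if c = 'B' then "Selangor" else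
  if c = 'C' then "Pahang" else if c = 'D' then "Kelantan" else
  if c = 'F' then "W.P. Putrajaya" else if c = 'J' then "Johor" else
  if c = 'K' then "Kedah" else if c = 'L' then "W.P. Labuan" else
  if c = 'M' then "Melaka" else if c = 'N' then "Negeri Sembilan" else
  if c = 'P' then "Pulau Pinang" else if c = 'Q' then "Sarawak" else
  if c = 'R' then "Perlis" else if c = 'S' then "Sabah" else
  if c = 'T' then "Terengganu" else if c = 'V' then "W.P. Kuala Lumpur" else
  if c = 'W' then "W.P. Kuala Lumpur" else if c = 'Z' then "Military" else
  if c = 'U' then "Special Series" else if c = 'X' then "Special Series" else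
  if c = 'Y' then "Special Series" else if c = 'H' then "Taxi" else "Unknown"

-- the 'for prefix, state in _MULTI' loop; fall-through is the final conditional return
def multiLoop (clean : List Char) : List (List Char × String) → String
  | [] =>
      match clean with
      | [] => "Unknown"
      | c :: _ => singleB c
  | (p, v) :: rest =>
      if PySem.Chars.startswith clean p then v else multiLoop clean rest

def identify_state_alt (plate_text : String) : String :=
  if plate_text = "" then "Unknown"
  else
    let clean := PySem.Chars.upper (PySem.Chars.replace plate_text.toList [' '] [])
    multiLoop clean multiB

-- ===== PRECONDITION & SPEC =====
def Spec_identify_state (plate_text : String) (out : String) : Prop := out = identify_state_alt plate_text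
instance (plate_text : String) (out : String) : Decidable (Spec_identify_state plate_text out) := by unfold Spec_identify_state; infer_instance

-- ===== CLAIM (what is proved, stated in full; the proofs are below) =====
def Claim_equal_identify_state : Prop := ∀ (plate_text : String), Dom_identify_state plate_text → Spec_identify_state plate_text (identify_state plate_text)

-- ===== LEMMAS AND PROOFS =====

-- the singleton keys of state_map, in A's scan order among equal lengths
def singles : List Char :=
  ['A','B','C','D','F','J','K','L','M','N','P','Q','R','S','T','V','W','Z','U','X','Y','H']

-- sorted(state_map.keys(), key=len, reverse=True) = the multi keys (in multiB's order) then the singletons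
theorem sorted_keys_eq :
    PySem.List.sorted stateMapA.keys (fun k => PySem.Chars.len k) true
      = multiB.map Prod.fst ++ singles.map (fun c => [c]) := by decide

-- scanning singleton keys over c :: rest is a lookup of [c]
theorem aScan_singletons (c : Char) (rest : List Char) (ks : List Char)
    (hmem : ∀ k ∈ ks, [k] ∈ stateMapA.keys)
    (hcov : [c] ∈ stateMapA.keys → c ∈ ks) :
    aScan (c :: rest) (ks.map (fun k => [k]))
      = (stateMapA.get? [c]).getD "Unknown" := by
  induction ks with
  | nil =>
      have hnone : stateMapA.get? [c] = none := by
        rw [PySem.Dict.get?_eq_none_iff_not_mem_keys]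
        intro hk
        simpa using hcov hk
      simp [aScan, hnone]
  | cons k ks ih =>
      by_cases hk : k = c
      · subst hk
        have hsw : PySem.Chars.startswith (k :: rest) [k] = true :=
          (PySem.Chars.startswith_iff _ _).mpr ⟨rest, rfl⟩
        obtain ⟨v, hv⟩ : ∃ v, stateMapA.get? [k] = some v := by
          cases hg : stateMapA.get? [k] with
          | none =>
              exact absurd (hmem k (by simp))
                ((PySem.Dict.get?_eq_none_iff_not_mem_keys _ _).mp hg)
          | some v => exact ⟨v, rfl⟩
        simp [aScan, hsw, hv]
      · have hsw : PySem.Chars.startswith (c :: rest) [k] = false := by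
          by_contra h
          have : [k] <+: c :: rest := (PySem.Chars.startswith_iff _ _).mp
            (by revert h; cases PySem.Chars.startswith (c :: rest) [k] <;> simp)
          obtain ⟨t, ht⟩ := this
          exact hk (by injection ht)
        simp only [List.map_cons, aScan, hsw, Bool.false_eq_true, if_false]
        exact ih (fun q hq => hmem q (by simp [hq]))
          (fun hkc => by
            rcases List.mem_cons.mp (hcov hkc) with h | h
            · exact absurd h.symm hk
            · exact h)

-- stateMapA.keys evaluated: the singletons (in insertion order) around the multi keys
set_option maxRecDepth 8000 in
theorem keys_eq : stateMapA.keys =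
    (singles.take 18).map (fun c => [c]) ++
    [['K','V'],['E','V'],['F','F','F'],['V','I','P'],['G','O','L','D'],['L','I','M','O'],
     ['M','A','D','A','N','I'],['P','E','T','R','A']] ++ (singles.drop 18).map (fun c => [c]) := by
  decide

theorem singles_mem : ∀ k ∈ singles, [k] ∈ stateMapA.keys := by
  intro k hk
  rw [keys_eq]
  simp [singles] at hk ⊢
  tauto

theorem mem_singles (c : Char) (hk : [c] ∈ stateMapA.keys) : c ∈ singles := by
  rw [keys_eq] at hk
  simp [singles] at hk ⊢
  tauto

-- the dict lookup of a single character agrees with B's dispatch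
theorem single_lookup (c : Char) :
    (stateMapA.get? [c]).getD "Unknown" = singleB c := by
  by_cases hA : c = 'A'
  · subst hA; decide
  by_cases hB : c = 'B'
  · subst hB; decide
  by_cases hC : c = 'C'
  · subst hC; decide
  by_cases hD : c = 'D'
  · subst hD; decide
  by_cases hF : c = 'F'
  · subst hF; decide
  by_cases hJ : c = 'J'
  · subst hJ; decide
  by_cases hK : c = 'K'
  · subst hK; decide
  by_cases hL : c = 'L'
  · subst hL; decide
  by_cases hM : c = 'M'
  · subst hM; decide
  by_cases hN : c = 'N'
  · subst hN; decide
  by_cases hP : c = 'P'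
  · subst hP; decide
  by_cases hQ : c = 'Q'
  · subst hQ; decide
  by_cases hR : c = 'R'
  · subst hR; decide
  by_cases hS : c = 'S'
  · subst hS; decide
  by_cases hT : c = 'T'
  · subst hT; decide
  by_cases hV : c = 'V'
  · subst hV; decide
  by_cases hW : c = 'W'
  · subst hW; decide
  by_cases hZ : c = 'Z'
  · subst hZ; decide
  by_cases hU : c = 'U'
  · subst hU; decide
  by_cases hX : c = 'X'
  · subst hX; decide
  by_cases hY : c = 'Y'
  · subst hY; decide
  by_cases hH : c = 'H'
  · subst hH; decide
  have hnone : stateMapA.get? [c] = none := by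
    rw [PySem.Dict.get?_eq_none_iff_not_mem_keys]
    intro hk
    have hs := mem_singles c hk
    simp [singles] at hs
    tauto
  simp [singleB, hA, hB, hC, hD, hF, hJ, hK, hL, hM, hN, hP, hQ, hR, hS, hT, hV, hW, hZ, hU, hX, hY, hH, hnone]

set_option maxRecDepth 8000 in
-- the singleton tail of A's scan equals B's loop fall-through
theorem aScan_tail_eq (s : List Char) :
    aScan s (singles.map (fun c => [c]))
      = (match s with | [] => "Unknown" | c :: _ => singleB c) := by
  cases s with
  | nil => decide
  | cons c rest =>
      rw [aScan_singletons c rest singles singles_mem (fun hk => mem_singles c hk)]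
      exact single_lookup c

-- prepending the multi keys to A's scan equals B's two-stage loop
theorem multi_eq (s : List Char) :
    aScan s (multiB.map Prod.fst ++ singles.map (fun c => [c]))
      = multiLoop s multiB := by
  simp only [multiB, List.map_cons, List.map_nil, List.cons_append, List.nil_append,
    aScan, multiLoop]
  rw [aScan_tail_eq s]
  rfl

-- ===== VERDICT (by name: the statement is the Claim_ definition above) =====
theorem identify_state_spec : Claim_equal_identify_state := by
  intro plate_text _
  unfold Spec_identify_state identify_state identify_state_alt
  split
  · rfl
  · rw [sorted_keys_eq]; exact multi_eq _
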